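-- pv_equiv track=rewrite | github.com/953250587/leetcode-python | PartitionArrayIntoDisjointIntervals_MID_915.py | partitionDisjoint_1
-- ===== SOURCE A (Python) =====
-- def partitionDisjoint_1(A):
--     """
--     :type A: List[int]
--     :rtype: int
--     32ms
--     """
--     # 找到最小之前的一段序列，这段必定位于左侧
--     l = A[:A.index(min(A))]
--     if len(l) == 0:
--         return 1
--     # 找出这个序列的最大值
--     a = max(l)
--     ans = 0
--     # 从后往前找到第一个比a来的小的位置，右侧的划分必定在这个位置右侧
--     for i in range(len(A) - 1, -1, -1):
--         if A[i] < a: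
--             ans = i + 1
--             break
--     while min(A[ans:]) < max(A[:ans]):
--         ans += 1
--     return ans
-- ===== SOURCE B (Python) =====
-- def partitionDisjoint_1(A):
--     """Single pass: track max of the left part and running max; on a violation
--     extend the left part to the current position."""
--     left_max = cur_max = A[0]
--     ans = 1
--     for i in range(1, len(A)):
--         x = A[i]
--         if x > cur_max:
--             cur_max = x
--         if x < left_max:
--             left_max = cur_max
--             ans = i + 1
--     return ans
-- ===== Notes on version B (the rewrite author's own statement) =====
-- stated objective: alternative
-- what changed: Replaces A's min/index/backwards-scan plus a while loop that recomputes min(A[ans:]) and max(A[:ans]) on every step with one forward pass tracking the running max and the max of the left part, extending the partition on violation.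
import Mathlib
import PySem

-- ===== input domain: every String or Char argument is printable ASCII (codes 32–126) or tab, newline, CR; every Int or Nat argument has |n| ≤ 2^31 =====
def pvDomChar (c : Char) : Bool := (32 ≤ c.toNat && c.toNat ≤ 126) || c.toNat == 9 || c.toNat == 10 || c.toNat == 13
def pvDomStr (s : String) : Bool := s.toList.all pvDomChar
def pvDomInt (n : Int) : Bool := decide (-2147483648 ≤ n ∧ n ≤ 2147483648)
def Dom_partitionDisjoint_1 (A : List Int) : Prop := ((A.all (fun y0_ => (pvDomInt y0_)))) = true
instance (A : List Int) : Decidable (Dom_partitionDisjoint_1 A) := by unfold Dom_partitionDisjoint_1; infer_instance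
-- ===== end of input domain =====

-- B: one forward pass tracking the running max and the max of the left part, instead of
-- A's min/index/backwards-scan plus slice-recomputing while loop (objective: alternative).


-- ===== PORT A =====
-- 'for i in range(len(A)-1,-1,-1): if A[i] < a: ans = i+1; break' (falls through to ans = 0)
def pvForA (A : List Int) (a : Int) : List Int → Int
  | [] => 0
  | i :: rest => if PySem.List.pyGetD A i 0 < a then i + 1 else pvForA A a rest
-- 'while min(A[ans:]) < max(A[:ans]): ans += 1'; fuel = len(A)+1 never runs out on the
-- Python path (each iteration needs a non-empty A[ans:]); empty min()/max() raises → junk 0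
def pvWhileA (A : List Int) : Nat → Int → Int
  | 0, ans => ans
  | fuel + 1, ans =>
    match PySem.List.min? (PySem.List.slice A (some ans) none) (fun x => x),
          PySem.List.max? (PySem.List.slice A none (some ans)) (fun x => x) with
    | some mn, some mx => if mn < mx then pvWhileA A fuel (ans + 1) else ans
    | _, _ => 0
def partitionDisjoint_1 (A : List Int) : Int :=
  match PySem.List.min? A (fun x => x) with
  | none => 0  -- min([]) raises
  | some m =>
    match PySem.List.index? A m with
    | none => 0  -- unreachable: min is a member
    | some idx =>
      let l := PySem.List.slice A none (some (idx : Int))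
      if l.length = 0 then 1
      else
        match PySem.List.max? l (fun x => x) with
        | none => 0  -- unreachable: l nonempty
        | some a =>
          let ans := pvForA A a (PySem.List.pyRange ((A.length : Int) - 1) (-1) (-1))
          pvWhileA A (A.length + 1) ans

-- ===== PORT B =====
-- state: (index of current element, left_max, cur_max, ans)
def pvLoopB : List Int → Nat → Int → Int → Int → Int
  | [], _, _, _, ans => ans
  | x :: rest, i, leftMax, curMax, ans =>
    let curMax' := if x > curMax then x else curMax
    if x < leftMax then pvLoopB rest (i + 1) curMax' curMax' ((i : Int) + 1)
    else pvLoopB rest (i + 1) leftMax curMax' ans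
def partitionDisjoint_1_alt (A : List Int) : Int :=
  match A with
  | [] => 0  -- A[0] raises IndexError
  | x :: rest => pvLoopB rest 1 x x 1

-- ===== PRECONDITION & SPEC =====
-- p is a disjoint-partition point: everything left of p is ≤ everything from p on
def pvValidCut (A : List Int) (p : Nat) : Prop := ∀ x ∈ A.take p, ∀ y ∈ A.drop p, x ≤ y
-- A raises (ValueError on min()/max() of an empty slice) on the empty array and on non-empty arrays
-- with no partition point 1 ≤ p < len(A); exactly those inputs are excluded.
def Pre_partitionDisjoint_1 (A : List Int) : Prop :=
  A ≠ [] ∧ (A.length = 1 ∨ ∃ p < A.length, 1 ≤ p ∧ pvValidCut A p)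
instance (A : List Int) : Decidable (Pre_partitionDisjoint_1 A) := by
  unfold Pre_partitionDisjoint_1 pvValidCut; infer_instance
def pvWitness_partitionDisjoint_1 : List Int := [5, 0, 3, 8, 6]
def Spec_partitionDisjoint_1 (A : List Int) (out : Int) : Prop := out = partitionDisjoint_1_alt A
instance (A : List Int) (out : Int) : Decidable (Spec_partitionDisjoint_1 A out) := by unfold Spec_partitionDisjoint_1; infer_instance

-- ===== CLAIM (what is proved, stated in full; the proofs are below) =====
def Claim_equal_partitionDisjoint_1 : Prop := ∀ (A : List Int), Dom_partitionDisjoint_1 A → Pre_partitionDisjoint_1 A → Spec_partitionDisjoint_1 A (partitionDisjoint_1 A)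

-- ===== LEMMAS AND PROOFS =====
-- r is THE least partition point >= 1 (p = length always qualifies vacuously)
def pvIsLeastCut (A : List Int) (r : Nat) : Prop :=
  (1 ≤ r ∧ pvValidCut A r) ∧ ∀ q, 1 ≤ q → pvValidCut A q → r ≤ q

theorem pvIsLeastCut_unique {A : List Int} {r s : Nat}
    (hr : pvIsLeastCut A r) (hs : pvIsLeastCut A s) : r = s :=
  le_antisymm (hr.2 s hs.1.1 hs.1.2) (hs.2 r hr.1.1 hr.1.2)

theorem pvTake_mono_mem (l : List Int) {a q : Nat} (h : a ≤ q) {x : Int}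
    (hx : x ∈ l.take a) : x ∈ l.take q := by
  have he : l.take a = (l.take q).take a := by rw [List.take_take, Nat.min_eq_left h]
  rw [he] at hx; exact List.take_subset _ _ hx

theorem pvMem_drop_of_getD (l : List Int) {i j : Nat} (hij : i ≤ j) (hj : j < l.length) :
    l.getD j 0 ∈ l.drop i := by
  have h1 : j - i < (l.drop i).length := by simp; omega
  have h2 : (l.drop i)[j - i] = l[j] := by rw [List.getElem_drop]; congr 1; omega
  rw [List.getD_eq_getElem l 0 hj, ← h2]
  exact List.getElem_mem h1

theorem pvGetD_mem_take0 (l : List Int) {p : Nat} (h1 : 1 ≤ p) (h0 : 0 < l.length) :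
    l.getD 0 0 ∈ l.take p := by
  cases l with
  | nil => simp at h0
  | cons hd tl =>
    cases p with
    | zero => omega
    | succ p => simp

theorem pvValid_restrict {pre : List Int} {y : Int} {q : Nat} (hq : q ≤ pre.length)
    (h : pvValidCut (pre ++ [y]) q) : pvValidCut pre q := by
  intro x hx z hz
  exact h x (by rw [List.take_append_of_le_length hq]; exact hx)
    z (by rw [List.drop_append_of_le_length hq]; exact List.mem_append_left _ hz)

theorem pvLoopB_isLeast :
    ∀ (suf pre : List Int) (lm cm : Int) (a : Nat),
      (cm ∈ pre ∧ ∀ y ∈ pre, y ≤ cm) →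
      a ≤ pre.length →
      (lm ∈ pre.take a ∧ ∀ y ∈ pre.take a, y ≤ lm) →
      pvIsLeastCut pre a →
      ∃ r : Nat, pvLoopB suf pre.length lm cm (a : Int) = (r : Int) ∧
        pvIsLeastCut (pre ++ suf) r := by
  intro suf
  induction suf with
  | nil =>
    intro pre lm cm a _ _ _ hL
    exact ⟨a, by simp [pvLoopB], by simpa using hL⟩
  | cons y suf ih =>
    intro pre lm cm a hcm ha hlm hL
    have hcm' : (if y > cm then y else cm) ∈ pre ++ [y] ∧
        ∀ z ∈ pre ++ [y], z ≤ (if y > cm then y else cm) := by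
      constructor
      · split
        · simp
        · exact List.mem_append_left _ hcm.1
      · intro z hz
        rcases List.mem_append.mp hz with hz | hz
        · have := hcm.2 z hz
          split <;> omega
        · simp only [List.mem_singleton] at hz
          subst hz
          split <;> omega
    by_cases hy : y < lm
    · have hnew : pvIsLeastCut (pre ++ [y]) (pre.length + 1) := by
        refine ⟨⟨by omega, ?_⟩, ?_⟩
        · intro x hx z hz
          rw [List.drop_eq_nil_of_le (by simp)] at hz
          simp at hz
        · intro q h1 hval
          by_contra hq
          push Not at hq
          have hqle : q ≤ pre.length := by omega
          have hymem : y ∈ (pre ++ [y]).drop q := by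
            rw [List.drop_append_of_le_length hqle]; simp
          by_cases hqa : a ≤ q
          · have hlmmem : lm ∈ (pre ++ [y]).take q := by
              rw [List.take_append_of_le_length hqle]
              exact pvTake_mono_mem pre hqa hlm.1
            have := hval lm hlmmem y hymem
            omega
          · have hvr : pvValidCut pre q := pvValid_restrict hqle hval
            have := hL.2 q h1 hvr
            omega
      obtain ⟨r, hr, hrL⟩ := ih (pre ++ [y]) (if y > cm then y else cm)
        (if y > cm then y else cm) (pre.length + 1) hcm' (by simp)
        (by rw [List.take_of_length_le (by simp)]; exact hcm') hnew
      refine ⟨r, ?_, by simpa using hrL⟩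
      simp only [pvLoopB]
      rw [if_pos hy]
      have hr' : pvLoopB suf (pre.length + 1) (if y > cm then y else cm)
          (if y > cm then y else cm) ((pre.length : Int) + 1) = (r : Int) := by
        simpa [List.length_append] using hr
      exact hr'
    · have htake : (pre ++ [y]).take a = pre.take a := List.take_append_of_le_length ha
      have hnew : pvIsLeastCut (pre ++ [y]) a := by
        refine ⟨⟨hL.1.1, ?_⟩, ?_⟩
        · intro x hx z hz
          rw [htake] at hx
          rw [List.drop_append_of_le_length ha] at hz
          rcases List.mem_append.mp hz with hz | hz
          · exact hL.1.2 x hx z hz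
          · simp only [List.mem_singleton] at hz
            subst hz
            have := hlm.2 x hx
            omega
        · intro q h1 hval
          by_contra hq
          push Not at hq
          have hqle : q ≤ pre.length := by omega
          have hvr : pvValidCut pre q := pvValid_restrict hqle hval
          have := hL.2 q h1 hvr
          omega
      obtain ⟨r, hr, hrL⟩ := ih (pre ++ [y]) lm (if y > cm then y else cm) a hcm'
        (by simp; omega) (by rw [htake]; exact hlm) hnew
      refine ⟨r, ?_, by simpa using hrL⟩
      simp only [pvLoopB]
      rw [if_neg hy]
      simpa [List.length_append] using hr

theorem pvB_isLeast (A : List Int) (h : A ≠ []) :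
    ∃ r : Nat, partitionDisjoint_1_alt A = (r : Int) ∧ pvIsLeastCut A r := by
  obtain ⟨x, rest, rfl⟩ := List.exists_cons_of_ne_nil h
  have base : pvIsLeastCut [x] 1 := by
    refine ⟨⟨le_refl 1, ?_⟩, fun q h1 _ => h1⟩
    intro u hu v hv
    simp at hv
  obtain ⟨r, hr, hrL⟩ := pvLoopB_isLeast rest [x] x x 1
    ⟨by simp, by simp⟩ (by simp) ⟨by simp, by simp⟩ base
  exact ⟨r, by simpa [partitionDisjoint_1_alt] using hr, by simpa using hrL⟩

theorem pvForA_spec (A : List Int) (a : Int) :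
    ∀ b : Nat, b < A.length →
    (∃ j : Nat, j ≤ b ∧ A.getD j 0 < a ∧ (∀ k : Nat, j < k → k ≤ b → ¬(A.getD k 0 < a)) ∧
      pvForA A a (PySem.List.pyRange (b : Int) (-1) (-1)) = (j : Int) + 1)
    ∨ ((∀ k : Nat, k ≤ b → ¬(A.getD k 0 < a)) ∧
      pvForA A a (PySem.List.pyRange (b : Int) (-1) (-1)) = 0) := by
  intro b
  induction b with
  | zero =>
    intro hb
    rw [PySem.List.pyRange_neg_one_cons (by omega)]
    rw [show ((0 : Nat) : Int) - 1 = -1 by omega]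
    rw [PySem.List.pyRange_neg_one_eq_nil (by omega)]
    simp only [pvForA]
    by_cases h0 : PySem.List.pyGetD A ((0 : Nat) : Int) 0 < a
    · left
      exact ⟨0, le_refl 0, by simpa only [PySem.List.pyGetD_natCast] using h0,
        by omega, by rw [if_pos h0]⟩
    · right
      refine ⟨?_, by rw [if_neg h0]⟩
      intro k hk
      have hk0 : k = 0 := by omega
      subst hk0
      simpa only [PySem.List.pyGetD_natCast] using h0
  | succ b ih =>
    intro hb
    rw [PySem.List.pyRange_neg_one_cons (by push_cast; omega)]
    simp only [pvForA]
    by_cases hB : PySem.List.pyGetD A ((b + 1 : Nat) : Int) 0 < a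
    · left
      exact ⟨b + 1, le_refl _, by simpa only [PySem.List.pyGetD_natCast] using hB,
        by omega, by rw [if_pos hB]⟩
    · rw [if_neg hB]
      rw [show ((b + 1 : Nat) : Int) - 1 = ((b : Nat) : Int) by push_cast; ring]
      rcases ih (by omega) with ⟨j, hj, hja, hmax, hres⟩ | ⟨hall, hres⟩
      · left
        refine ⟨j, by omega, hja, ?_, hres⟩
        intro k hk1 hk2
        rcases Nat.lt_or_ge k (b + 1) with hc | hc
        · exact hmax k hk1 (by omega)
        · have hke : k = b + 1 := by omega
          subst hke
          simpa only [PySem.List.pyGetD_natCast] using hB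
      · right
        refine ⟨?_, hres⟩
        intro k hk
        rcases Nat.lt_or_ge k (b + 1) with hc | hc
        · exact hall k (by omega)
        · have hke : k = b + 1 := by omega
          subst hke
          simpa only [PySem.List.pyGetD_natCast] using hB

theorem pvWhileA_reach (A : List Int) (pstar : Nat) (hL : pvIsLeastCut A pstar)
    (hsn : pstar < A.length) :
    ∀ (fuel p : Nat), 1 ≤ p → p ≤ pstar → pstar - p < fuel →
      pvWhileA A fuel (p : Int) = (pstar : Int) := by
  intro fuel
  induction fuel with
  | zero => intro p _ _ hf; exact absurd hf (by omega)
  | succ fuel ih =>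
    intro p h1 hp hf
    have hplen : p < A.length := by omega
    have hdrop : PySem.List.slice A (some ((p : Nat) : Int)) none = A.drop p :=
      PySem.List.slice_from_natCast A p
    have htake : PySem.List.slice A none (some ((p : Nat) : Int)) = A.take p :=
      PySem.List.slice_to_natCast A p
    simp only [pvWhileA, hdrop, htake]
    have hdne : A.drop p ≠ [] := List.ne_nil_of_length_pos (by rw [List.length_drop]; omega)
    have htne : A.take p ≠ [] := List.ne_nil_of_length_pos (by rw [List.length_take]; omega)
    cases hmn : PySem.List.min? (A.drop p) (fun x => x) with
    | none => exact absurd ((PySem.List.min?_eq_none_iff _ _).mp hmn) hdne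
    | some mn =>
    cases hmx : PySem.List.max? (A.take p) (fun x => x) with
    | none => exact absurd ((PySem.List.max?_eq_none_iff _ _).mp hmx) htne
    | some mx =>
    have hmnmem : mn ∈ A.drop p := PySem.List.min?_mem hmn
    have hmnmin := PySem.List.min?_isMin hmn
    have hmxmem : mx ∈ A.take p := PySem.List.max?_mem hmx
    have hmxmax := PySem.List.max?_isMax hmx
    dsimp only
    by_cases hps : p = pstar
    · subst hps
      have hle : mx ≤ mn := hL.1.2 mx hmxmem mn hmnmem
      rw [if_neg (by omega)]
    · have hnv : ¬ pvValidCut A p := fun hv => absurd (hL.2 p h1 hv) (by omega)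
      unfold pvValidCut at hnv
      push Not at hnv
      obtain ⟨u, hu, v, hv, huv⟩ := hnv
      have h5 : mn ≤ v := hmnmin v hv
      have h6 : u ≤ mx := hmxmax u hu
      rw [if_pos (by omega)]
      rw [show ((p : Nat) : Int) + 1 = ((p + 1 : Nat) : Int) by push_cast; ring]
      exact ih (p + 1) (by omega) (by omega) (by omega)

theorem pvA_isLeast (A : List Int) (h : Pre_partitionDisjoint_1 A) :
    ∃ r : Nat, partitionDisjoint_1 A = (r : Int) ∧ pvIsLeastCut A r := by
  obtain ⟨hne, hex⟩ := h
  have hlen0 : 0 < A.length := List.length_pos_of_ne_nil hne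
  unfold partitionDisjoint_1
  cases hm : PySem.List.min? A (fun x => x) with
  | none => exact absurd ((PySem.List.min?_eq_none_iff _ _).mp hm) hne
  | some m =>
  dsimp only
  have hmmem : m ∈ A := PySem.List.min?_mem hm
  have hmin : ∀ y ∈ A, m ≤ y := PySem.List.min?_isMin hm
  cases hidx : PySem.List.index? A m with
  | none => exact absurd hmmem ((PySem.List.index?_eq_none_iff _ _).mp hidx)
  | some idx =>
  dsimp only
  obtain ⟨hidxlt, hAidx, hbefore⟩ := PySem.List.getElem_of_index?_eq_some hidx
  have hAidx' : A.getD idx 0 = m := by rw [List.getD_eq_getElem A 0 hidxlt]; exact hAidx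
  have hmin0 : m ≤ A.getD 0 0 := by
    rw [List.getD_eq_getElem A 0 hlen0]
    exact hmin _ (List.getElem_mem hlen0)
  have hsl : PySem.List.slice A none (some ((idx : Nat) : Int)) = A.take idx :=
    PySem.List.slice_to_natCast A idx
  rw [hsl]
  by_cases hidx0 : idx = 0
  · subst hidx0
    simp only [List.take_zero, List.length_nil]
    refine ⟨1, by norm_num, ⟨⟨le_refl 1, ?_⟩, fun q h1 _ => h1⟩⟩
    intro x hx y hy
    have hx0 : x = A.getD 0 0 := by
      cases A with
      | nil => simp at hlen0
      | cons hd tl => simpa using hx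
    have hym : m ≤ y := hmin y (List.drop_subset 1 A hy)
    rw [hx0, hAidx']
    exact hym
  · have hlne : ¬ (A.take idx).length = 0 := by
      simp only [List.length_take]
      omega
    rw [if_neg hlne]
    cases hmx : PySem.List.max? (A.take idx) (fun x => x) with
    | none =>
      have := (PySem.List.max?_eq_none_iff _ _).mp hmx
      rw [this] at hlne
      simp at hlne
    | some a =>
    dsimp only
    have hamem : a ∈ A.take idx := PySem.List.max?_mem hmx
    have hamax := PySem.List.max?_isMax hmx
    have hma : m < a := by
      have h0t : A.getD 0 0 ∈ A.take idx := pvGetD_mem_take0 A (by omega) hlen0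
      have h1 := hamax _ h0t
      have hne0 : A.getD 0 0 ≠ m := by
        rw [List.getD_eq_getElem A 0 hlen0]
        exact hbefore 0 (by omega)
      omega
    have hcast : ((A.length : Int) - 1) = ((A.length - 1 : Nat) : Int) := by omega
    rw [hcast]
    rcases pvForA_spec A a (A.length - 1) (by omega) with
      ⟨j, hjb, hja, hjmax, hres⟩ | ⟨hall, hres⟩
    · have hij : idx ≤ j := by
        by_contra hcon
        push Not at hcon
        exact hjmax idx hcon (by omega) (by rw [hAidx']; exact hma)
      have hjlt : j < A.length := by omega
      obtain ⟨p0, hp0lt, hp01, hp0v⟩ : ∃ p, p < A.length ∧ 1 ≤ p ∧ pvValidCut A p := by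
        rcases hex with h1 | ⟨p, hplt, h1p, hv⟩
        · exact absurd h1 (by omega)
        · exact ⟨p, hplt, h1p, hv⟩
      have hexnat : ∃ p, 1 ≤ p ∧ pvValidCut A p := ⟨p0, hp01, hp0v⟩
      haveI : DecidablePred (fun p => 1 ≤ p ∧ pvValidCut A p) := fun p => by
        unfold pvValidCut; infer_instance
      have hspec := Nat.find_spec hexnat
      have hLeast : pvIsLeastCut A (Nat.find hexnat) :=
        ⟨hspec, fun q h1 hv => Nat.find_le ⟨h1, hv⟩⟩
      have hpslt : Nat.find hexnat < A.length :=
        lt_of_le_of_lt (hLeast.2 p0 hp01 hp0v) hp0lt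
      have hbelow : ∀ p, 1 ≤ p → p ≤ j → ¬ pvValidCut A p := by
        intro p h1 hpj hval
        by_cases hpi : p ≤ idx
        · have hmd : m ∈ A.drop p := by
            rw [← hAidx']
            exact pvMem_drop_of_getD A hpi hidxlt
          have h0t : A.getD 0 0 ∈ A.take p := pvGetD_mem_take0 A h1 hlen0
          have h01 := hval _ h0t _ hmd
          have hne0 : A.getD 0 0 ≠ m := by
            rw [List.getD_eq_getElem A 0 hlen0]
            exact hbefore 0 (by omega)
          omega
        · push Not at hpi
          have hat : a ∈ A.take p := pvTake_mono_mem A (by omega) hamem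
          have hjd : A.getD j 0 ∈ A.drop p := pvMem_drop_of_getD A (by omega) hjlt
          have h2 := hval _ hat _ hjd
          omega
      have hjp : j + 1 ≤ Nat.find hexnat := by
        by_contra hcon
        push Not at hcon
        exact hbelow (Nat.find hexnat) hspec.1 (by omega) hspec.2
      have final := pvWhileA_reach A (Nat.find hexnat) hLeast hpslt (A.length + 1)
        (j + 1) (by omega) hjp (by omega)
      refine ⟨Nat.find hexnat, ?_, hLeast⟩
      rw [hres]
      rw [show ((j : Nat) : Int) + 1 = ((j + 1 : Nat) : Int) by push_cast; ring]
      exact final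
    · exact absurd (by rw [hAidx']; exact hma) (hall idx (by omega))

-- ===== VERDICT (by name: the statement is the Claim_ definition above) =====
theorem partitionDisjoint_1_spec : Claim_equal_partitionDisjoint_1 := by
  intro A _ hpre
  obtain ⟨r, hr, hrL⟩ := pvA_isLeast A hpre
  obtain ⟨s, hs, hsL⟩ := pvB_isLeast A hpre.1
  unfold Spec_partitionDisjoint_1
  rw [hr, hs, pvIsLeastCut_unique hrL hsL]
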